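-- pv_equiv track=rewrite | github.com/girumajebe/safaricometCode_challange1 | import math;.py | deleteFromEnd
-- ===== SOURCE A (Python) =====
-- def deleteFromEnd(num, n):
--
--
--     rev_new_num = 0;
--
--
--     i = 1;
--     while (num != 0):
--
--         digit = num % 10;
--         num = int(num / 10);
--
--         if (i != n):
--             rev_new_num = ((rev_new_num * 10) +
--                                         digit);
--         i += 1;
--
--
--     new_num = 0;
--
--
--     i = 0;
--     while (rev_new_num != 0):
--
--         new_num = ((new_num * 10) +
--                    (rev_new_num % 10));
--         rev_new_num = int(rev_new_num / 10);
--         i += 1;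
--
--
--     return new_num;
-- ===== SOURCE B (Python) =====
-- def deleteFromEnd(num, n):
--     # One forward pass: accumulate kept digits with a running place value,
--     # instead of building a reversed number and reversing it in a second loop.
--     new_num = 0
--     place = 1
--     i = 1
--     while num != 0:
--         digit = num % 10
--         num = int(num / 10)
--         if i != n:
--             new_num += digit * place
--             place *= 10
--         i += 1
--     return new_num
-- ===== Notes on version B (the rewrite author's own statement) =====
-- stated objective: simpler
-- what changed: B builds the answer in one forward pass with a running place value (new_num += digit*place) instead of A's two loops that first build the digit-reversed number and then reverse it again; this also keeps trailing zeros that A's second reversal silently drops.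
-- intended difference: On inputs where the digit kept at the lowest place is 0 (for n=1 the second-lowest digit of num, otherwise the lowest digit), the result has trailing zeros which A's reverse-and-reverse-back drops (A(100,2)=1) while B keeps them, returning the intended value (B(100,2)=10); in the degenerate sub-case where every kept digit is 0 both return 0. — e.g. on deleteFromEnd(100, 2): A returns 1, B returns 10
import Mathlib
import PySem

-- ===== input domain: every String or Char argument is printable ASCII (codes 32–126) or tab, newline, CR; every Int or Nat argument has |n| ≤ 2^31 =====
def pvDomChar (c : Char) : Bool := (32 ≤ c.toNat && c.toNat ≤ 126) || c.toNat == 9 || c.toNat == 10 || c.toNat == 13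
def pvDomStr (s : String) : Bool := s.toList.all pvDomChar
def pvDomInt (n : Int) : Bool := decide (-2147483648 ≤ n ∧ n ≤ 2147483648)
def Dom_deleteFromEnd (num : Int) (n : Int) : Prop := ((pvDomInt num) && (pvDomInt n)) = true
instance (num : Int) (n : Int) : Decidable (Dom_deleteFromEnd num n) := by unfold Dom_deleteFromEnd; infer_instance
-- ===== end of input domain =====

-- B replaces A's build-reversed-then-reverse-again pair of loops by a single forward pass with a
-- running place value (simpler); where the intended result has trailing zeros A drops them and B
-- keeps them, stated as D_ below. Note: Python's `int(num / 10)` is ported as `Int.tdiv num 10`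
-- (truncation toward zero); this is exact for the |num| ≤ 2^31 inputs of Dom_ (well inside the
-- 2^53 range where float division followed by int() equals truncating integer division).

-- termination helper, cited by the ports' decreasing_by
theorem pvTdivLt (a : Int) (h : a ≠ 0) : (a.tdiv 10).natAbs < a.natAbs := by
  rw [Int.natAbs_tdiv]
  exact Nat.div_lt_self (by omega) (by norm_num)

-- ===== PORT A =====
-- first while loop of A: builds rev_new_num from the digits, skipping the n-th
def aLoop1 (num : Int) (n : Int) (i : Int) (rev : Int) : Int :=
  if h : num = 0 then rev
  else
    -- digit = num % 10; num = int(num / 10); if i != n: rev = rev*10 + digit; i += 1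
    aLoop1 (num.tdiv 10) n (i + 1)
      (if i ≠ n then rev * 10 + PySem.Int.mod num 10 else rev)
termination_by num.natAbs
decreasing_by exact pvTdivLt num h

-- second while loop of A: reverses rev_new_num into new_num (i is kept, unused, as in A)
def aLoop2 (rev : Int) (new : Int) (i : Int) : Int :=
  if h : rev = 0 then new
  else aLoop2 (rev.tdiv 10) (new * 10 + PySem.Int.mod rev 10) (i + 1)
termination_by rev.natAbs
decreasing_by exact pvTdivLt rev h

def deleteFromEnd (num : Int) (n : Int) : Int :=
  aLoop2 (aLoop1 num n 1 0) 0 0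

-- ===== PORT B =====
-- B's single while loop: new_num += digit * place for every kept digit
def bLoop (num : Int) (n : Int) (i : Int) (res : Int) (place : Int) : Int :=
  if h : num = 0 then res
  else
    bLoop (num.tdiv 10) n (i + 1)
      (if i ≠ n then res + PySem.Int.mod num 10 * place else res)
      (if i ≠ n then place * 10 else place)
termination_by num.natAbs
decreasing_by exact pvTdivLt num h

def deleteFromEnd_alt (num : Int) (n : Int) : Int :=
  bLoop num n 1 0 1

-- ===== PRECONDITION & SPEC =====
-- On inputs where the digit that ends up in the lowest place after deleting the n-th digit
-- from the end is 0 (for n = 1 that is the second-lowest digit of num, otherwise the lowest),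
-- A's reverse-and-reverse-back drops the resulting trailing zeros (A 100 2 = 1) while B keeps
-- them, returning the intended value (B 100 2 = 10); in the degenerate sub-case where every
-- kept digit is 0 both return 0.
def D_deleteFromEnd (num : Int) (n : Int) : Prop :=
  let q := if n = 1 then num.tdiv 10 else num
  q ≠ 0 ∧ 10 ∣ q
instance (num : Int) (n : Int) : Decidable (D_deleteFromEnd num n) := by
  unfold D_deleteFromEnd; infer_instance

def Spec_deleteFromEnd (num : Int) (n : Int) (out : Int) : Prop :=
  ¬ D_deleteFromEnd num n → out = deleteFromEnd_alt num n
instance (num : Int) (n : Int) (out : Int) : Decidable (Spec_deleteFromEnd num n out) := by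
  unfold Spec_deleteFromEnd; infer_instance

def pvDiffWitness_deleteFromEnd : Int × Int := (100, 2)
def pvDiffWitnessOut_deleteFromEnd : Int × Int := (1, 10)

-- ===== CLAIM (what is proved, stated in full; the proofs are below) =====
def Claim_unchanged_deleteFromEnd : Prop := ∀ (num : Int) (n : Int), Dom_deleteFromEnd num n → Spec_deleteFromEnd num n (deleteFromEnd num n)
def Claim_changed_deleteFromEnd : Prop := Dom_deleteFromEnd (pvDiffWitness_deleteFromEnd.1) (pvDiffWitness_deleteFromEnd.2) ∧ D_deleteFromEnd (pvDiffWitness_deleteFromEnd.1) (pvDiffWitness_deleteFromEnd.2) ∧ deleteFromEnd (pvDiffWitness_deleteFromEnd.1) (pvDiffWitness_deleteFromEnd.2) = pvDiffWitnessOut_deleteFromEnd.1 ∧ deleteFromEnd_alt (pvDiffWitness_deleteFromEnd.1) (pvDiffWitness_deleteFromEnd.2) = pvDiffWitnessOut_deleteFromEnd.2 ∧ pvDiffWitnessOut_deleteFromEnd.1 ≠ pvDiffWitnessOut_deleteFromEnd.2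

-- ===== LEMMAS AND PROOFS =====

def pvDigits (num : Int) : List Int :=
  if h : num = 0 then []
  else PySem.Int.mod num 10 :: pvDigits (num.tdiv 10)
termination_by num.natAbs
decreasing_by exact pvTdivLt num h

def pvKeep (ds : List Int) (n : Int) (i : Int) : List Int :=
  match ds with
  | [] => []
  | d :: t => if i ≠ n then d :: pvKeep t n (i + 1) else pvKeep t n (i + 1)

-- little-endian value of a digit list

def lval : List Int → Int
  | [] => 0
  | d :: t => d + 10 * lval t

-- remove the maximal all-zero suffix (= high-order zeros of a little-endian digit list)

def stripZ : List Int → List Int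
  | [] => []
  | d :: t => if stripZ t = [] ∧ d = 0 then [] else d :: stripZ t

theorem pvMod10 (a : Int) : PySem.Int.mod a 10 = a % 10 :=
  PySem.Int.mod_eq_emod_of_pos (by norm_num)

theorem pvDigits_mem (num : Int) : ∀ d ∈ pvDigits num, 0 ≤ d ∧ d < 10 := by
  fun_induction pvDigits num with
  | case1 => simp
  | case2 m h ih =>
    intro d hd
    rw [List.mem_cons] at hd
    rcases hd with hd | hd
    · rw [hd, pvMod10]; omega
    · exact ih d hd

theorem pvKeep_mem (ds : List Int) (n i d : Int) (h : d ∈ pvKeep ds n i) : d ∈ ds := by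
  induction ds generalizing i with
  | nil => simp [pvKeep] at h
  | cons e t ih =>
    simp only [pvKeep] at h
    split at h
    · rw [List.mem_cons] at h
      rcases h with h | h
      · simp [h]
      · exact List.mem_cons_of_mem _ (ih _ h)
    · exact List.mem_cons_of_mem _ (ih _ h)

theorem lval_nonneg (L : List Int) (h : ∀ d ∈ L, 0 ≤ d) : 0 ≤ lval L := by
  induction L with
  | nil => simp [lval]
  | cons d t ih =>
    have h1 := h d (by simp)
    have h2 := ih (fun e he => h e (List.mem_cons_of_mem _ he))
    simp only [lval]; omega

theorem lval_append (M N : List Int) :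
    lval (M ++ N) = lval M + 10 ^ M.length * lval N := by
  induction M with
  | nil => simp [lval]
  | cons d t ih => simp only [List.cons_append, lval, ih, List.length_cons]; ring

theorem foldl_eq_lval (L : List Int) (r : Int) :
    List.foldl (fun r d => r * 10 + d) r L = r * 10 ^ L.length + lval L.reverse := by
  induction L generalizing r with
  | nil => simp [lval]
  | cons d t ih =>
    simp only [List.foldl_cons, ih, List.reverse_cons, lval_append, List.length_reverse,
      List.length_cons, lval]
    ring

theorem aLoop1_eq (num n i rev : Int) :
    aLoop1 num n i rev =
      List.foldl (fun r d => r * 10 + d) rev (pvKeep (pvDigits num) n i) := by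
  fun_induction aLoop1 num n i rev with
  | case1 i rev => rw [pvDigits]; simp [pvKeep]
  | case2 num i rev h ih =>
    rw [pvDigits]
    by_cases hin : i = n
    · simp [pvKeep, hin, h] at ih ⊢
      exact ih
    · simp [pvKeep, hin, h] at ih ⊢
      exact ih

theorem aLoop2_eq (rev new i : Int) :
    aLoop2 rev new i = List.foldl (fun r d => r * 10 + d) new (pvDigits rev) := by
  fun_induction aLoop2 rev new i with
  | case1 new i => rw [pvDigits]; simp
  | case2 rev new i h ih =>
    rw [pvDigits]
    simp [h] at ih ⊢
    exact ih

theorem bLoop_eq (num n i res place : Int) :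
    bLoop num n i res place = res + place * lval (pvKeep (pvDigits num) n i) := by
  fun_induction bLoop num n i res place with
  | case1 i res place => rw [pvDigits]; simp [pvKeep, lval]
  | case2 num i res place h ih =>
    rw [pvDigits]
    by_cases hin : i = n
    · simp [pvKeep, hin, h] at ih ⊢
      exact ih
    · simp [pvKeep, hin, h, lval] at ih ⊢
      rw [ih]; ring

theorem pvDigits_eq_nil_iff (x : Int) : pvDigits x = [] ↔ x = 0 := by
  constructor
  · intro h
    by_contra hx
    rw [pvDigits] at h
    simp [hx] at h
  · intro h; rw [h, pvDigits]; simp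

theorem pvDigits_lval (N : List Int) (h : ∀ d ∈ N, 0 ≤ d ∧ d < 10) :
    pvDigits (lval N) = stripZ N := by
  induction N with
  | nil => simp [lval, pvDigits, stripZ]
  | cons d t ih =>
    have hd := h d (by simp)
    have ht : ∀ e ∈ t, 0 ≤ e ∧ e < 10 := fun e he => h e (List.mem_cons_of_mem _ he)
    have htn : 0 ≤ lval t := lval_nonneg t (fun e he => (ht e he).1)
    have iht := ih ht
    by_cases hz : lval (d :: t) = 0
    · have hd0 : d = 0 ∧ lval t = 0 := by simp only [lval] at hz ⊢; omega
      have hse : stripZ t = [] := by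
        rw [← iht, hd0.2, pvDigits]; simp
      rw [hz, pvDigits]
      simp [stripZ, hse, hd0.1]
    · rw [pvDigits]
      simp only [hz, dite_false]
      have hmod : PySem.Int.mod (lval (d :: t)) 10 = d := by
        rw [pvMod10]
        simp only [lval]; omega
      have htd : (lval (d :: t)).tdiv 10 = lval t := by
        have hnn : 0 ≤ lval (d :: t) := by simp only [lval]; omega
        rw [Int.tdiv_eq_ediv_of_nonneg hnn]
        simp only [lval]; omega
      rw [hmod, htd, iht]
      have hne : ¬ (stripZ t = [] ∧ d = 0) := by
        rintro ⟨h1, h2⟩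
        apply hz
        have : lval t = 0 := by
          rw [← iht] at h1
          exact (pvDigits_eq_nil_iff _).mp h1
        simp only [lval]; omega
      simp [stripZ, hne]

theorem stripZ_reverse (M : List Int) :
    (stripZ M).reverse = (M.reverse).dropWhile (fun d => d == 0) := by
  induction M with
  | nil => simp [stripZ]
  | cons d t ih =>
    simp only [List.reverse_cons, List.dropWhile_append, ← ih]
    by_cases h1 : stripZ t = []
    · by_cases h2 : d = 0 <;> simp [stripZ, h1, h2]
    · have hne : ¬ (stripZ t = [] ∧ d = 0) := by tauto
      simp [stripZ, h1]

theorem keep_gt (ds : List Int) (n : Int) : ∀ i : Int, n < i → pvKeep ds n i = ds := by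
  induction ds with
  | nil => intro i _; rfl
  | cons d t ih =>
    intro i h
    have hin : i ≠ n := by omega
    simp [pvKeep, hin, ih (i + 1) (by omega)]

-- D_ says exactly: the digit that B keeps at the lowest place exists and is 0
theorem D_iff (num n : Int) :
    D_deleteFromEnd num n ↔ (pvKeep (pvDigits num) n 1).headD 1 = 0 := by
  simp only [D_deleteFromEnd]
  by_cases h0 : num = 0
  · subst h0
    rw [pvDigits]
    simp [pvKeep, Int.zero_tdiv]
  by_cases hn1 : n = 1
  · subst hn1
    rw [if_pos rfl, pvDigits]
    simp only [h0, dite_false, pvKeep, ne_eq, not_true_eq_false, if_false]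
    rw [keep_gt _ _ (1 + 1) (by omega)]
    by_cases hz : num.tdiv 10 = 0
    · rw [hz, pvDigits]
      simp
    · rw [pvDigits]
      simp only [hz, dite_false, List.headD_cons]
      rw [pvMod10]
      constructor
      · rintro ⟨-, h2⟩; exact Int.emod_eq_zero_of_dvd h2
      · intro h; exact ⟨by simp, Int.dvd_of_emod_eq_zero h⟩
  · rw [if_neg hn1, pvDigits]
    have h1n : (1 : Int) ≠ n := fun h => hn1 h.symm
    simp only [h0, dite_false, pvKeep, h1n, ne_eq, not_false_eq_true, if_true,
      List.headD_cons]
    rw [pvMod10]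
    constructor
    · rintro ⟨-, h2⟩; exact Int.emod_eq_zero_of_dvd h2
    · intro h; exact ⟨by simp, Int.dvd_of_emod_eq_zero h⟩

-- the central characterisation: A computes the kept digits with low-order zeros dropped,
-- B computes the kept digits as they are
theorem A_eq_lval_drop (num n : Int) :
    deleteFromEnd num n =
      lval ((pvKeep (pvDigits num) n 1).dropWhile (fun d => d == 0)) := by
  have hrev : ∀ d ∈ (pvKeep (pvDigits num) n 1).reverse, 0 ≤ d ∧ d < 10 := by
    intro d hd
    exact pvDigits_mem num d (pvKeep_mem _ _ _ _ (List.mem_reverse.mp hd))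
  unfold deleteFromEnd
  rw [aLoop2_eq, aLoop1_eq]
  have hone : List.foldl (fun r d => r * 10 + d) 0 (pvKeep (pvDigits num) n 1) =
      lval (pvKeep (pvDigits num) n 1).reverse := by
    rw [foldl_eq_lval]; ring
  rw [hone, pvDigits_lval _ hrev, foldl_eq_lval, stripZ_reverse, List.reverse_reverse]
  ring

theorem B_eq_lval (num n : Int) :
    deleteFromEnd_alt num n = lval (pvKeep (pvDigits num) n 1) := by
  unfold deleteFromEnd_alt
  rw [bLoop_eq]
  ring

theorem pvDigits_step (x : Int) (hx : x ≠ 0) :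
    pvDigits x = x % 10 :: pvDigits (x.tdiv 10) := by
  rw [pvDigits, pvMod10]
  simp [hx]

theorem pvDigits_zero : pvDigits 0 = [] := by
  rw [pvDigits]; simp

theorem pvDigits_hundred : pvDigits (100 : Int) = [0, 0, 1] := by
  rw [pvDigits_step 100 (by decide), show ((100 : Int).tdiv 10) = 10 from by decide,
      pvDigits_step 10 (by decide), show ((10 : Int).tdiv 10) = 1 from by decide,
      pvDigits_step 1 (by decide), show ((1 : Int).tdiv 10) = 0 from by decide, pvDigits_zero]
  decide

-- ===== VERDICT (by name: the statement is the Claim_ definition above) =====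
theorem deleteFromEnd_spec : Claim_unchanged_deleteFromEnd := by
  unfold Claim_unchanged_deleteFromEnd
  intro num n _
  unfold Spec_deleteFromEnd
  intro hD
  rw [D_iff num n] at hD
  rw [A_eq_lval_drop, B_eq_lval]
  cases hksv : pvKeep (pvDigits num) n 1 with
  | nil => simp
  | cons d t =>
    rw [hksv] at hD
    have hd0 : d ≠ 0 := by simpa using hD
    simp [hd0]

theorem deleteFromEnd_changed : Claim_changed_deleteFromEnd := by
  unfold Claim_changed_deleteFromEnd
  refine ⟨by decide, by decide, ?_, ?_, by decide⟩
  · show deleteFromEnd 100 2 = 1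
    rw [A_eq_lval_drop, pvDigits_hundred]
    decide
  · show deleteFromEnd_alt 100 2 = 10
    rw [B_eq_lval, pvDigits_hundred]
    decide
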